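-- pv_equiv track=rewrite | github.com/GodRishUniverse/dsa-practice | freq.py | string_to_dict_freq
-- ===== SOURCE A (Python) =====
-- def string_to_dict_freq(string):
--     freq_dict = {}
--     for char in string:
--         if char not in freq_dict:
--             freq_dict[char] = 1
--         else:
--             freq_dict[char] += 1
--     return len(set(freq_dict.values()))
-- ===== SOURCE B (Python) =====
-- def string_to_dict_freq(string):
--     def runs(s):
--         # s is sorted, so each maximal run of equal chars is one character's full count
--         if not s:
--             return []
--         n = 1
--         while n < len(s) and s[n] == s[0]:
--             n += 1
--         return [n] + runs(s[n:])
--     return len(set(runs(sorted(string))))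
-- ===== Notes on version B (the rewrite author's own statement) =====
-- stated objective: alternative
-- what changed: Replaces the hash-map character tally with a sort-then-run-length strategy: sort the string, recursively scan maximal runs of equal characters and collect each run's length, then count the distinct lengths.
import Mathlib
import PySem

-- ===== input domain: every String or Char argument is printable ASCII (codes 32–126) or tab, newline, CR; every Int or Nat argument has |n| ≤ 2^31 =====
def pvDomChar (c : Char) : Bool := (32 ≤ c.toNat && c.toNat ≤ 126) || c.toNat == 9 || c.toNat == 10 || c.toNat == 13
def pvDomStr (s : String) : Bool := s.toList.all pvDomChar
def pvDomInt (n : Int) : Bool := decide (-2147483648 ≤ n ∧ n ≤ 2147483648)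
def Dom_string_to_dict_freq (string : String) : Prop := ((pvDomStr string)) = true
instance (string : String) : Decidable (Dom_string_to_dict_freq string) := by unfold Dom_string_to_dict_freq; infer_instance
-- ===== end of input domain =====

-- B replaces A's character-tally dict with a sort-then-run-length scan: sort the string,
-- collect the length of each maximal run of equal characters, count the distinct lengths
-- (objective: alternative algorithm; return value only, no mutation involved).

-- ===== PORT A =====
def string_to_dict_freq (string : String) : Int :=
  let freq_dict : PySem.Dict Char Int :=
    string.toList.foldl
      (fun d c => if d.contains c = false then d.insert c 1 else d.modify c 0 (· + 1))
      PySem.Dict.empty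
  PySem.Set.len (PySem.Set.ofList freq_dict.values)

-- ===== PORT B =====
-- the inner 'while n < len(s) and s[n] == s[0]' counts the leading run of s[0]:
-- n ends as 1 + length of the maximal prefix of s[1:] equal to s[0] (takeWhile),
-- and s[n:] is the rest (dropWhile); then recurse.
def pvRuns : List Char → List Int
  | [] => []
  | c :: rest =>
      (((rest.takeWhile (fun x => x == c)).length : Int) + 1) ::
        pvRuns (rest.dropWhile (fun x => x == c))
  termination_by s => s.length
  decreasing_by exact Nat.lt_succ_of_le (List.length_dropWhile_le _ _)

def string_to_dict_freq_alt (string : String) : Int :=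
  PySem.Set.len (PySem.Set.ofList (pvRuns (PySem.List.sorted string.toList (fun x => x) false)))

-- ===== PRECONDITION & SPEC =====
def Spec_string_to_dict_freq (string : String) (out : Int) : Prop := out = string_to_dict_freq_alt string
instance (string : String) (out : Int) : Decidable (Spec_string_to_dict_freq string out) := by unfold Spec_string_to_dict_freq; infer_instance

-- ===== CLAIM (what is proved, stated in full; the proofs are below) =====
def Claim_equal_string_to_dict_freq : Prop := ∀ (string : String), Dom_string_to_dict_freq string → Spec_string_to_dict_freq string (string_to_dict_freq string)

-- ===== LEMMAS AND PROOFS =====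

-- A's branch ("new key ↦ 1, else += 1") is exactly Counter's modify step.
theorem loop_step_eq (d : PySem.Dict Char Int) (c : Char) :
    (if d.contains c = false then d.insert c 1 else d.modify c 0 (· + 1)) = d.modify c 0 (· + 1) := by
  by_cases h : d.contains c = true
  · simp [h]
  · simp only [Bool.not_eq_true] at h
    simp [h, PySem.Dict.modify, PySem.Dict.getD_of_not_contains]

-- A computes the number of distinct per-distinct-character counts.
theorem A_eq (string : String) :
    string_to_dict_freq string =
      PySem.Set.len (PySem.Set.ofList
        ((PySem.Set.ofList string.toList).map (fun c => (string.toList.count c : Int)))) := by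
  unfold string_to_dict_freq
  have hfun : (fun (d : PySem.Dict Char Int) (c : Char) =>
      if d.contains c = false then d.insert c 1 else d.modify c 0 (· + 1))
      = fun d c => d.modify c 0 (· + 1) := funext fun d => funext fun c => loop_step_eq d c
  simp only [hfun]
  rw [← PySem.Dict.counter_eq_foldl]
  simp [PySem.Dict.values, PySem.Dict.items_counter, List.map_map, Function.comp_def]

-- len(set(..)) only depends on membership of the underlying list.
theorem setlen_congr (l₁ l₂ : List Int) (h : ∀ x, x ∈ l₁ ↔ x ∈ l₂) :
    PySem.Set.len (PySem.Set.ofList l₁) = PySem.Set.len (PySem.Set.ofList l₂) := by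
  have hperm : (PySem.Set.ofList l₁ : List Int).Perm (PySem.Set.ofList l₂) := by
    rw [List.perm_ext_iff_of_nodup (PySem.Set.nodup_ofList _) (PySem.Set.nodup_ofList _)]
    intro x
    simp [PySem.Set.mem_ofList, h x]
  simp [PySem.Set.len, hperm.length_eq]

-- in a sorted list, everything after the leading run of the head is strictly larger
theorem dropWhile_head_lt (c : Char) (rest : List Char)
    (hrest : rest.Pairwise (· ≤ ·)) (hle : ∀ x ∈ rest, c ≤ x) :
    ∀ x ∈ rest.dropWhile (fun x => x == c), c < x := by
  cases h : rest.dropWhile (fun x => x == c) with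
  | nil => simp
  | cons d t =>
    have hd : ¬ (d == c) = true := by
      have := List.head?_dropWhile_not (p := fun x => x == c) (l := rest)
      rw [h] at this; simpa using this
    have hdc : d ≠ c := by simpa using hd
    have hdrest : d ∈ rest := (List.dropWhile_sublist _).subset (h ▸ List.mem_cons_self)
    have hcd : c < d := lt_of_le_of_ne (hle d hdrest) (Ne.symm hdc)
    have hpt : (d :: t).Pairwise (· ≤ ·) := h ▸ hrest.sublist (List.dropWhile_sublist _)
    intro x hx
    rcases List.mem_cons.mp hx with h1 | h1
    · exact h1 ▸ hcd
    · exact lt_of_lt_of_le hcd ((List.pairwise_cons.mp hpt).1 x h1)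

-- run lengths of a sorted list are exactly the counts of its elements
theorem mem_pvRuns (m : List Char) (hs : m.Pairwise (· ≤ ·)) (n : Int) :
    n ∈ pvRuns m ↔ ∃ c ∈ m, (m.count c : Int) = n := by
  match m with
  | [] => simp [pvRuns]
  | c :: rest =>
    rw [pvRuns]
    have hsplit : rest = rest.takeWhile (fun x => x == c) ++ rest.dropWhile (fun x => x == c) :=
      (List.takeWhile_append_dropWhile).symm
    have hprec : ∀ x ∈ rest.takeWhile (fun x => x == c), x = c := by
      intro x hx
      have := List.mem_takeWhile_imp hx
      simpa using this
    have hrest : rest.Pairwise (· ≤ ·) := (List.pairwise_cons.mp hs).2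
    have hle : ∀ x ∈ rest, c ≤ x := (List.pairwise_cons.mp hs).1
    have hsufp : (rest.dropWhile (fun x => x == c)).Pairwise (· ≤ ·) :=
      hrest.sublist (List.dropWhile_sublist _)
    have hsufgt : ∀ x ∈ rest.dropWhile (fun x => x == c), c < x :=
      dropWhile_head_lt c rest hrest hle
    have hcount_c : ((c :: rest).count c : Int) = ((rest.takeWhile (fun x => x == c)).length : Int) + 1 := by
      have h1 : (rest.takeWhile (fun x => x == c)).count c = (rest.takeWhile (fun x => x == c)).length := by
        rw [List.count_eq_length]; intro x hx; exact ((hprec x hx) ▸ rfl)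
      have h2 : (rest.dropWhile (fun x => x == c)).count c = 0 := by
        rw [List.count_eq_zero]; intro hc; exact absurd rfl (ne_of_gt (hsufgt c hc)).symm
      have hr : rest.count c = (rest.takeWhile (fun x => x == c)).length := by
        conv_lhs => rw [hsplit]
        rw [List.count_append, h1, h2]
        omega
      rw [List.count_cons_self, hr]
      push_cast; ring
    have hcount_suf : ∀ x ∈ rest.dropWhile (fun x => x == c),
        (c :: rest).count x = (rest.dropWhile (fun x => x == c)).count x := by
      intro x hx
      have hxc : x ≠ c := ne_of_gt (hsufgt x hx)
      have hxpre : (rest.takeWhile (fun x => x == c)).count x = 0 := by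
        rw [List.count_eq_zero]; intro hc; exact hxc (hprec x hc)
      have hr : rest.count x = (rest.dropWhile (fun x => x == c)).count x := by
        conv_lhs => rw [hsplit]
        rw [List.count_append, hxpre, Nat.zero_add]
      rw [List.count_cons, hr]
      have hcx' : ¬ c = x := fun h => hxc h.symm
      simp [hcx']
    have IH := mem_pvRuns (rest.dropWhile (fun x => x == c)) hsufp n
    constructor
    · intro hmem
      rcases List.mem_cons.mp hmem with h1 | h1
      · exact ⟨c, List.mem_cons_self, by rw [hcount_c, h1]⟩
      · rcases (IH.mp h1) with ⟨x, hx, hcx⟩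
        refine ⟨x, ?_, ?_⟩
        · rw [hsplit]; exact List.mem_cons_of_mem _ (List.mem_append_right _ hx)
        · rw [hcount_suf x hx]; exact hcx
    · rintro ⟨x, hx, hcx⟩
      rcases List.mem_cons.mp hx with h1 | h1
      · exact List.mem_cons.mpr (Or.inl (by rw [← hcx, h1]; exact hcount_c))
      · rw [hsplit] at h1
        rcases List.mem_append.mp h1 with h2 | h2
        · exact List.mem_cons.mpr (Or.inl (by rw [← hcx, hprec x h2]; exact hcount_c))
        · exact List.mem_cons.mpr (Or.inr (IH.mpr ⟨x, h2, by rw [← hcount_suf x h2]; exact hcx⟩))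
  termination_by m.length
  decreasing_by exact Nat.lt_succ_of_le (List.length_dropWhile_le _ _)

-- ===== VERDICT (by name: the statement is the Claim_ definition above) =====
theorem string_to_dict_freq_spec : Claim_equal_string_to_dict_freq := by
  intro string _
  unfold Spec_string_to_dict_freq string_to_dict_freq_alt
  rw [A_eq]
  set chars := string.toList with hchars
  set m := PySem.List.sorted chars (fun x => x) false with hm
  have hperm : m.Perm chars := PySem.List.sorted_perm ..
  apply setlen_congr
  intro n
  rw [mem_pvRuns m (PySem.List.sorted_pairwise ..) n]
  constructor
  · rintro hmem
    rcases List.mem_map.mp hmem with ⟨x, hx, hcx⟩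
    exact ⟨x, hperm.mem_iff.mpr (by simpa [PySem.Set.mem_ofList] using hx), by rw [hperm.count_eq]; exact hcx⟩
  · rintro ⟨x, hx, hcx⟩
    exact List.mem_map.mpr ⟨x, (by simpa [PySem.Set.mem_ofList] using hperm.mem_iff.mp hx),
      by rw [← hperm.count_eq]; exact hcx⟩
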